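-- pv_equiv track=rewrite | github.com/sushantjadhav416/python_codes | digi20.py | King_george
-- ===== SOURCE A (Python) =====
-- def King_george(num:int) -> int:
--     x = [0,1,1]
--     y = [0,1,2]
--     for i in range(3,num+1):
--         x += [y[i-1]]
--         y += [x[i-1] + y[i-1]]
--     result = x[num] + y[num]
--     return result*result
-- ===== SOURCE B (Python) =====
-- def _fib_pair(n: int):
--     # returns (F(n), F(n+1)) by fast doubling
--     if n == 0:
--         return (0, 1)
--     a, b = _fib_pair(n // 2)
--     c = a * (2 * b - a)
--     d = a * a + b * b
--     if n % 2 == 1: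
--         return (d, c + d)
--     return (c, d)
--
-- def King_george(num: int) -> int:
--     if num <= 0:
--         return 0
--     f, _ = _fib_pair(num + 2)
--     return f * f
-- ===== Notes on version B (the rewrite author's own statement) =====
-- stated objective: faster
-- what changed: Replaced the O(n) list-building loop (the coupled recurrence is Fibonacci in disguise: x[n]+y[n]=Fib of n+2, for positive n) by O(log n) fast-doubling Fibonacci.
-- outside the precondition, e.g. on King_george(-1): A returns 9, B returns 0; on King_george(-2): A returns 4, B returns 0; on King_george(-4): A raises IndexError, B returns 0
import Mathlib
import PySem

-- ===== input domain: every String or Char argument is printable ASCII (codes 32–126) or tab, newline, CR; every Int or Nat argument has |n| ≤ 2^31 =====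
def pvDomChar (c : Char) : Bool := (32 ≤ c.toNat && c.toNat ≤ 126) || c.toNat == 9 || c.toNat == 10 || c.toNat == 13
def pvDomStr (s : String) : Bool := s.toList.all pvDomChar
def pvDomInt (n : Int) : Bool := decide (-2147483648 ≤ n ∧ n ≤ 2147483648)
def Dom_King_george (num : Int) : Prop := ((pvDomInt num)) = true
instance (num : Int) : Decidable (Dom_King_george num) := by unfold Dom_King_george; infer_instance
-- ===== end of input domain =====

-- B replaces the O(n) list-building loop by O(log n) fast-doubling Fibonacci
-- (x[n]+y[n] = Fib(n+2) for n ≥ 1); return values only, A mutates nothing observable.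

-- ===== PORT A =====
def King_george (num : Int) : Int :=
  let x : List Int := [0, 1, 1]
  let y : List Int := [0, 1, 2]
  let s := (PySem.List.pyRange 3 (num + 1) 1).foldl
    (fun (s : List Int × List Int) i =>
      let x := s.1 ++ [PySem.List.pyGetD s.2 (i - 1) 0]
      let y := s.2 ++ [PySem.List.pyGetD x (i - 1) 0 + PySem.List.pyGetD s.2 (i - 1) 0]
      (x, y)) (x, y)
  let result := PySem.List.pyGetD s.1 num 0 + PySem.List.pyGetD s.2 num 0
  result * result

-- ===== PORT B =====
-- fast doubling: fibPair n = (F(n), F(n+1))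
def fibPair (n : Nat) : Int × Int :=
  if h : n = 0 then (0, 1)
  else
    let p := fibPair (n / 2)
    let a := p.1
    let b := p.2
    let c := a * (2 * b - a)
    let d := a * a + b * b
    if n % 2 = 1 then (d, c + d) else (c, d)
termination_by n
decreasing_by exact Nat.div_lt_self (Nat.pos_of_ne_zero h) (by norm_num)

def King_george_alt (num : Int) : Int :=
  if num ≤ 0 then 0
  else
    let f := (fibPair (num + 2).toNat).1
    f * f

-- ===== PRECONDITION & SPEC =====
-- Pre_ excludes negative num: A's values at num = -1..-3 come from accidental Python
-- negative-index wraparound into the seed lists, and for num ≤ -4 A raises IndexError;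
-- B naturally returns zero there.
def Pre_King_george (num : Int) : Prop := 0 ≤ num
instance (num : Int) : Decidable (Pre_King_george num) := by unfold Pre_King_george; infer_instance
def pvWitness_King_george : Int := (5)

def Spec_King_george (num : Int) (out : Int) : Prop := out = King_george_alt num
instance (num : Int) (out : Int) : Decidable (Spec_King_george num out) := by unfold Spec_King_george; infer_instance

-- ===== CLAIM (what is proved, stated in full; the proofs are below) =====
def Claim_equal_King_george : Prop := ∀ (num : Int), Dom_King_george num → Pre_King_george num → Spec_King_george num (King_george num)

-- ===== LEMMAS AND PROOFS =====

-- fast doubling computes Fibonacci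
theorem fibPair_eq (n : Nat) : fibPair n = ((Nat.fib n : Int), (Nat.fib (n + 1) : Int)) := by
  induction n using Nat.strong_induction_on with
  | _ n ih =>
    by_cases h : n = 0
    · subst h; simp [fibPair]
    · rw [fibPair]
      simp only [h, dite_false]
      rw [ih (n / 2) (Nat.div_lt_self (Nat.pos_of_ne_zero h) (by norm_num))]
      have hle : Nat.fib (n / 2) ≤ 2 * Nat.fib (n / 2 + 1) :=
        le_trans (Nat.fib_le_fib_succ) (by omega)
      have hc : (Nat.fib (n / 2) : Int) * (2 * (Nat.fib (n / 2 + 1) : Int) - (Nat.fib (n / 2) : Int))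
          = (Nat.fib (2 * (n / 2)) : Int) := by
        rw [Nat.fib_two_mul]; push_cast [hle]; ring
      have hd : (Nat.fib (n / 2) : Int) * (Nat.fib (n / 2) : Int)
            + (Nat.fib (n / 2 + 1) : Int) * (Nat.fib (n / 2 + 1) : Int)
          = (Nat.fib (2 * (n / 2) + 1) : Int) := by
        rw [Nat.fib_two_mul_add_one]; push_cast; ring
      by_cases hodd : n % 2 = 1
      · simp only [hodd, if_true]
        refine Prod.ext ?_ ?_
        · show (Nat.fib (n/2) : Int) * (Nat.fib (n/2) : Int)
              + (Nat.fib (n/2+1) : Int) * (Nat.fib (n/2+1) : Int) = (Nat.fib n : Int)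
          rw [hd]; congr 2; omega
        · show (Nat.fib (n/2) : Int) * (2 * (Nat.fib (n/2+1) : Int) - (Nat.fib (n/2) : Int))
              + _ = (Nat.fib (n + 1) : Int)
          rw [hc, hd]
          have hn1 : n + 1 = 2 * (n / 2) + 1 + 1 := by omega
          rw [hn1, Nat.fib_add_two]
          push_cast; ring
      · simp only [hodd, if_false]
        refine Prod.ext ?_ ?_
        · show (Nat.fib (n/2) : Int) * (2 * (Nat.fib (n/2+1) : Int) - (Nat.fib (n/2) : Int))
              = (Nat.fib n : Int)
          rw [hc]; congr 2; omega
        · show (Nat.fib (n/2) : Int) * (Nat.fib (n/2) : Int)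
              + (Nat.fib (n/2+1) : Int) * (Nat.fib (n/2+1) : Int) = (Nat.fib (n + 1) : Int)
          rw [hd]; congr 2; omega

-- the list states of A's loop
def fibL (m : Nat) : List Int := (List.range (m + 1)).map (fun j => (Nat.fib j : Int))
def yL (m : Nat) : List Int := 0 :: (List.range m).map (fun j => (Nat.fib (j + 2) : Int))

theorem fibL_getD (m k : Nat) (h : k ≤ m) : (fibL m).getD k 0 = (Nat.fib k : Int) := by
  unfold fibL
  rw [List.getD_eq_getElem?_getD, List.getElem?_map, List.getElem?_range (by omega : k < m + 1)]
  simp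

theorem yL_getD (m : Nat) (h : 1 ≤ m) : (yL m).getD m 0 = (Nat.fib (m + 1) : Int) := by
  unfold yL
  obtain ⟨j, rfl⟩ : ∃ j, m = j + 1 := ⟨m - 1, by omega⟩
  rw [List.getD_cons_succ, List.getD_eq_getElem?_getD, List.getElem?_map,
      List.getElem?_range (by omega : j < j + 1)]
  simp [show j + 2 = j + 1 + 1 from rfl]

theorem loop_eq (m : Nat) (h : 2 ≤ m) :
    (PySem.List.pyRange 3 ((m : Int) + 1) 1).foldl
      (fun (s : List Int × List Int) i =>
        let x := s.1 ++ [PySem.List.pyGetD s.2 (i - 1) 0]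
        let y := s.2 ++ [PySem.List.pyGetD x (i - 1) 0 + PySem.List.pyGetD s.2 (i - 1) 0]
        (x, y)) ([0, 1, 1], [0, 1, 2])
    = (fibL m, yL m) := by
  induction m with
  | zero => omega
  | succ m ih =>
    by_cases hm : m = 1
    · subst hm
      norm_num [PySem.List.pyRange_one_eq_nil, fibL, yL, List.range_succ]
    · have h2 : 2 ≤ m := by omega
      rw [show ((((m+1) : Nat) : Int) + 1) = ((m : Int) + 1) + 1 by push_cast; ring,
          PySem.List.pyRange_one_succ_right (by omega), List.foldl_append, ih h2]
      simp only [List.foldl_cons, List.foldl_nil]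
      have hidx : (m : Int) + 1 - 1 = ((m : Nat) : Int) := by ring
      have hy_get : PySem.List.pyGetD (yL m) ((m : Nat) : Int) 0 = (Nat.fib (m + 1) : Int) := by
        rw [PySem.List.pyGetD_natCast]; exact yL_getD m (by omega)
      have hx_get : PySem.List.pyGetD (fibL m ++ [(Nat.fib (m+1) : Int)]) ((m : Nat) : Int) 0
          = (Nat.fib m : Int) := by
        rw [PySem.List.pyGetD_natCast]
        have hlen : m < (fibL m).length := by simp [fibL]
        rw [List.getD_eq_getElem?_getD, List.getElem?_append_left hlen,
            ← List.getD_eq_getElem?_getD]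
        exact fibL_getD m m le_rfl
      refine Prod.ext ?_ ?_
      · show fibL m ++ [PySem.List.pyGetD (yL m) ((m:Int)+1-1) 0] = fibL (m + 1)
        rw [hidx, hy_get]
        simp [fibL, List.range_succ]
      · show yL m ++ [PySem.List.pyGetD (fibL m ++ [PySem.List.pyGetD (yL m) ((m:Int)+1-1) 0]) ((m:Int)+1-1) 0
              + PySem.List.pyGetD (yL m) ((m:Int)+1-1) 0] = yL (m + 1)
        rw [hidx, hy_get, hx_get]
        have hfib : (Nat.fib m : Int) + (Nat.fib (m + 1) : Int) = (Nat.fib (m + 2) : Int) := by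
          rw [Nat.fib_add_two]; push_cast; ring
        rw [hfib]
        simp [yL, List.range_succ]

theorem king_big (m : Nat) (h : 2 ≤ m) : King_george (m : Int) = King_george_alt (m : Int) := by
  have hx : PySem.List.pyGetD (fibL m) ((m : Nat) : Int) 0 = (Nat.fib m : Int) := by
    rw [PySem.List.pyGetD_natCast]; exact fibL_getD m m le_rfl
  have hy : PySem.List.pyGetD (yL m) ((m : Nat) : Int) 0 = (Nat.fib (m + 1) : Int) := by
    rw [PySem.List.pyGetD_natCast]; exact yL_getD m (by omega)
  have hpos : ¬ ((m : Int) ≤ 0) := by omega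
  have ht : ((m : Int) + 2).toNat = m + 2 := by omega
  have hfib : (Nat.fib m : Int) + (Nat.fib (m + 1) : Int) = (Nat.fib (m + 2) : Int) := by
    rw [Nat.fib_add_two]; push_cast; ring
  simp only [King_george, King_george_alt]
  rw [loop_eq m h]
  simp only [hx, hy, hpos, if_false, ht, fibPair_eq, hfib]

-- ===== VERDICT (by name: the statement is the Claim_ definition above) =====
theorem King_george_spec : Claim_equal_King_george := by
  intro num _ hpre
  unfold Spec_King_george
  have h0 : 0 ≤ num := hpre
  obtain ⟨n, rfl⟩ : ∃ n : Nat, num = (n : Int) := ⟨num.toNat, by omega⟩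
  rcases Nat.lt_or_ge n 3 with hlt | hge
  · interval_cases n <;>
    · simp only [King_george, King_george_alt]
      rw [PySem.List.pyRange_one_eq_nil (by omega)]
      simp [fibPair_eq]
      all_goals decide
  · exact king_big n (by omega)
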